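-- pv_equiv track=rewrite | github.com/raeez/chiral-bar-cobar | compute/lib/sft_bar_comparison_engine.py | gl_n_mult_table
-- ===== SOURCE A (Python) =====
-- from typing import Any, Dict, FrozenSet, List, Optional, Tuple
--
-- def gl_n_mult_table(n: int) -> Dict[Tuple[str, str], Dict[str, int]]:
--     """Multiplication table for gl_N: e_{ij} * e_{kl} = delta_{jk} * e_{il}.
--
--     Returns {("e_ij", "e_kl"): {"e_il": 1}} when j == k, empty dict otherwise.
--     """
--     table = {}
--     for i in range(1, n + 1):
--         for j in range(1, n + 1):
--             for k in range(1, n + 1):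
--                 for l in range(1, n + 1):
--                     a = f"e_{i}{j}"
--                     b = f"e_{k}{l}"
--                     if j == k:
--                         table[(a, b)] = {f"e_{i}{l}": 1}
--     return table
-- ===== SOURCE B (Python) =====
-- def gl_n_mult_table(n: int):
--     """Multiplication table for gl_N without the k loop: the product is
--     nonzero only when j == k, so iterate (i, j, l) with k fixed to j.
--     The value {"e_il": 1} does not depend on j, so each row's value dicts
--     are built once per i and shared (aliased) across the j loop."""
--     table = {}
--     for i in range(1, n + 1):
--         vals = {}
--         for l in range(1, n + 1):
--             vals[l] = {f"e_{i}{l}": 1}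
--         for j in range(1, n + 1):
--             a = f"e_{i}{j}"
--             for l in range(1, n + 1):
--                 table[(a, f"e_{j}{l}")] = vals[l]
--     return table
-- ===== Notes on version B (the rewrite author's own statement) =====
-- stated objective: faster
-- what changed: B drops the k loop entirely (the product is nonzero only when j == k, so it iterates (i, j, l) with k fixed to j, turning four nested loops into three) and builds each row's singleton value dicts once per i, sharing them across the j loop.
import Mathlib
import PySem

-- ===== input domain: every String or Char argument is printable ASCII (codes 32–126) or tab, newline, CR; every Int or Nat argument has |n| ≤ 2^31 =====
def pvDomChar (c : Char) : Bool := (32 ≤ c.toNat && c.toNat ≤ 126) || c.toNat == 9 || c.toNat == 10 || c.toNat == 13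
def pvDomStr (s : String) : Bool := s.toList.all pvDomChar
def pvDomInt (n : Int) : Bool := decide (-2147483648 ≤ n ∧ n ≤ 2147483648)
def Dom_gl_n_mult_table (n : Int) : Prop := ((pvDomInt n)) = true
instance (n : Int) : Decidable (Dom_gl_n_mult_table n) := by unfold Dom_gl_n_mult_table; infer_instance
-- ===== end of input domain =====

-- B drops the k loop of A (the product is nonzero only when j == k, so k is fixed to j)
-- and shares each row's value dicts across the j loop; intended as faster; same returned table.

-- ===== PORT A =====
-- f"e_{i}{j}"
def pvEnt (i j : Int) : String := "e_" ++ PySem.Int.toStr i ++ PySem.Int.toStr j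

def gl_n_mult_table (n : Int) : List (String × String × List (String × Int)) :=
  let table : PySem.Dict (String × String) (List (String × Int)) :=
    (PySem.List.pyRange 1 (n + 1) 1).foldl (fun t i =>
      (PySem.List.pyRange 1 (n + 1) 1).foldl (fun t j =>
        (PySem.List.pyRange 1 (n + 1) 1).foldl (fun t k =>
          (PySem.List.pyRange 1 (n + 1) 1).foldl (fun t l =>
            let a := pvEnt i j
            let b := pvEnt k l
            if j = k then t.insert (a, b) [(pvEnt i l, 1)] else t) t) t) t)
      PySem.Dict.empty
  table.items.map (fun p => (p.1.1, p.1.2, p.2))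

-- ===== PORT B =====
def gl_n_mult_table_alt (n : Int) : List (String × String × List (String × Int)) :=
  let table : PySem.Dict (String × String) (List (String × Int)) :=
    (PySem.List.pyRange 1 (n + 1) 1).foldl (fun t i =>
      let vals : PySem.Dict Int (List (String × Int)) :=
        (PySem.List.pyRange 1 (n + 1) 1).foldl (fun v l => v.insert l [(pvEnt i l, 1)])
          PySem.Dict.empty
      (PySem.List.pyRange 1 (n + 1) 1).foldl (fun t j =>
        let a := pvEnt i j
        (PySem.List.pyRange 1 (n + 1) 1).foldl (fun t l =>
          -- vals[l]: the key l is always present (filled for every l of the same range);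
          -- getD with default [] is exact here
          t.insert (a, pvEnt j l) (vals.getD l [])) t) t)
      PySem.Dict.empty
  table.items.map (fun p => (p.1.1, p.1.2, p.2))

-- ===== PRECONDITION & SPEC =====
def Spec_gl_n_mult_table (n : Int) (out : List (String × String × List (String × Int))) : Prop := out = gl_n_mult_table_alt n
instance (n : Int) (out : List (String × String × List (String × Int))) : Decidable (Spec_gl_n_mult_table n out) := by unfold Spec_gl_n_mult_table; infer_instance

-- ===== CLAIM (what is proved, stated in full; the proofs are below) =====
def Claim_equal_gl_n_mult_table : Prop := ∀ (n : Int), Dom_gl_n_mult_table n → Spec_gl_n_mult_table n (gl_n_mult_table n)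

-- ===== LEMMAS AND PROOFS =====

-- a fold whose step ignores both arguments' second component and returns the accumulator is the identity
theorem pv_foldl_id {α β : Type} (l : List β) (acc : α) :
    l.foldl (fun a _ => a) acc = acc := by
  induction l generalizing acc with
  | nil => rfl
  | cons x xs ih => simp only [List.foldl_cons]; exact ih acc

-- the k-loop of A: the step fires only at k = j, and j occurs exactly once, so the
-- whole fold is the single j-step
theorem pv_foldl_pick {α : Type} (j : Int) (G : Int → α → α)
    (hG : ∀ k acc, j ≠ k → G k acc = acc) :
    ∀ (ks : List Int), ks.count j = 1 → ∀ acc, ks.foldl (fun acc k => G k acc) acc = G j acc := by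
  intro ks
  induction ks with
  | nil => intro h; simp at h
  | cons k ks ih =>
    intro h acc
    rcases eq_or_ne j k with hk | hk
    · subst hk
      have h0 : ks.count j = 0 := by
        have := h; simp only [List.count_cons] at this; simpa using this
      have hnot : j ∉ ks := List.count_eq_zero.mp h0
      simp only [List.foldl_cons]
      -- remaining fold never fires
      clear ih h h0
      induction ks with
      | nil => rfl
      | cons x xs ih2 =>
        have hx : j ≠ x := by intro he; exact hnot (he ▸ List.mem_cons_self ..)
        simp only [List.foldl_cons, hG x _ hx]
        exact ih2 (fun hm => hnot (List.mem_cons_of_mem _ hm))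
    · have h1 : ks.count j = 1 := by
        have := h; simp only [List.count_cons] at this
        simpa [if_neg hk.symm] using this
      simp only [List.foldl_cons, hG k acc hk]
      exact ih h1 acc

-- getD after a fold inserting a key-determined value: last write wins and equals f x
theorem pv_getD_foldl_insert {ν : Type} (f : Int → ν) (d0 : ν) :
    ∀ (ks : List Int) (d : PySem.Dict Int ν) (x : Int),
      (ks.foldl (fun v k => v.insert k (f k)) d).getD x d0 =
        if x ∈ ks then f x else d.getD x d0 := by
  intro ks
  induction ks with
  | nil => intro d x; simp
  | cons k ks ih =>
    intro d x
    simp only [List.foldl_cons, ih, PySem.Dict.getD_insert, List.mem_cons]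
    by_cases hx : x ∈ ks
    · simp [hx]
    · by_cases hk : x = k <;> simp [hx, hk]

theorem pv_count_range (j n : Int) (hj : j ∈ PySem.List.pyRange 1 (n + 1) 1) :
    (PySem.List.pyRange 1 (n + 1) 1).count j = 1 := by
  have hnd := PySem.List.nodup_pyRange_one (a := 1) (b := n + 1)
  exact List.count_eq_one_of_mem hnd hj

-- ===== VERDICT (by name: the statement is the Claim_ definition above) =====
theorem gl_n_mult_table_spec : Claim_equal_gl_n_mult_table := by
  intro n _
  show gl_n_mult_table n = gl_n_mult_table_alt n
  unfold gl_n_mult_table gl_n_mult_table_alt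
  dsimp only
  congr 1
  congr 1
  refine PySem.List.foldl_congr_mem _ _ _ _ ?_
  intro t i _
  refine PySem.List.foldl_congr_mem _ _ _ _ ?_
  intro t j hj
  -- replace vals.getD l [] on B's side by the literal value it holds
  have hB := PySem.List.foldl_congr_mem (PySem.List.pyRange 1 (n + 1) 1)
    (fun t l => t.insert (pvEnt i j, pvEnt j l)
      (((PySem.List.pyRange 1 (n + 1) 1).foldl
          (fun v l => v.insert l [(pvEnt i l, 1)]) PySem.Dict.empty).getD l []))
    (fun t l => t.insert (pvEnt i j, pvEnt j l) [(pvEnt i l, 1)]) t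
    (by
      intro acc l hl
      dsimp only
      rw [pv_getD_foldl_insert (fun x => [(pvEnt i x, 1)]) [] _ PySem.Dict.empty l]
      simp [hl])
  rw [hB]
  -- collapse A's k-fold to the single k = j contribution
  have := pv_foldl_pick j
    (fun k t => (PySem.List.pyRange 1 (n + 1) 1).foldl (fun t l =>
        if j = k then t.insert (pvEnt i j, pvEnt k l) [(pvEnt i l, 1)] else t) t)
    (by
      intro k acc hne
      simp only [if_neg hne]
      exact pv_foldl_id _ acc)
    (PySem.List.pyRange 1 (n + 1) 1) (pv_count_range j n hj) t
  simpa using this
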